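-- pv_equiv track=rewrite | github.com/MAGIC-SCAN/adipose_tissue-unet | Segmentation/tile_classification_evaluation.py | calculate_confusion_matrix
-- ===== SOURCE A (Python) =====
-- from typing import Dict, List, Tuple, Optional
--
-- def calculate_confusion_matrix(predictions: List[str], ground_truth: List[str]) -> Dict:
--     """
--     Calculate confusion matrix for binary classification.
--
--     Args:
--         predictions: List of predictions ("Has Fat" or "No Fat")
--         ground_truth: List of ground truth labels
--
--     Returns:
--         Dictionary with TP, TN, FP, FN counts
--     """
--     assert len(predictions) == len(ground_truth), "Mismatch in list lengths"
--
--     tp = sum(1 for p, g in zip(predictions, ground_truth) if p == "Has Fat" and g == "Has Fat")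
--     tn = sum(1 for p, g in zip(predictions, ground_truth) if p == "No Fat" and g == "No Fat")
--     fp = sum(1 for p, g in zip(predictions, ground_truth) if p == "Has Fat" and g == "No Fat")
--     fn = sum(1 for p, g in zip(predictions, ground_truth) if p == "No Fat" and g == "Has Fat")
--
--     return {
--         'true_positive': tp,
--         'true_negative': tn,
--         'false_positive': fp,
--         'false_negative': fn,
--         'total': len(predictions)
--     }
-- ===== SOURCE B (Python) =====
-- from typing import Dict, List, Tuple, Optional
--
-- def calculate_confusion_matrix(predictions: List[str], ground_truth: List[str]) -> Dict:
--     """One fused pass: a nested decision tree updates the four cells in a single loop."""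
--     assert len(predictions) == len(ground_truth), "Mismatch in list lengths"
--     tp = tn = fp = fn = 0
--     for p, g in zip(predictions, ground_truth):
--         if p == "Has Fat":
--             if g == "Has Fat":
--                 tp += 1
--             elif g == "No Fat":
--                 fp += 1
--         elif p == "No Fat":
--             if g == "Has Fat":
--                 fn += 1
--             elif g == "No Fat":
--                 tn += 1
--     return {
--         'true_positive': tp,
--         'true_negative': tn,
--         'false_positive': fp,
--         'false_negative': fn,
--         'total': len(predictions)
--     }
-- ===== Notes on version B (the rewrite author's own statement) =====
-- stated objective: simpler
-- what changed: Replaces four separate filtered sum-scans over the zipped lists by one fused loop that classifies each pair with a nested decision tree and updates four counters in place.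
import Mathlib
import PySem

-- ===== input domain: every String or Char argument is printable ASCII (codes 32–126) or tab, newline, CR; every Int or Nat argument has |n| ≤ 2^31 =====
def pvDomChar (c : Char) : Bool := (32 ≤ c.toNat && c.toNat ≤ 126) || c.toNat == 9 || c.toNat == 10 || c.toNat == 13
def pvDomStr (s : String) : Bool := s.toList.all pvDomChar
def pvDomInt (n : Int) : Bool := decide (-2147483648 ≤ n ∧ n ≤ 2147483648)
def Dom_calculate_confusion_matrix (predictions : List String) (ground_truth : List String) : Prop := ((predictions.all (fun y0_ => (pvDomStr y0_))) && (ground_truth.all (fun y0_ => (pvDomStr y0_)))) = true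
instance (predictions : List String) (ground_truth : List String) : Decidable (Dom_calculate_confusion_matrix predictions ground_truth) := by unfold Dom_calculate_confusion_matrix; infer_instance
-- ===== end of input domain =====

-- B fuses A's four filtered sum-scans into one loop with a nested decision tree over a four-counter accumulator (simpler; same O(n) cost).

-- ===== PORT A =====
def calculate_confusion_matrix (predictions : List String) (ground_truth : List String) : List (String × Int) :=
  let tp : Int := (predictions.zip ground_truth).foldl (fun acc pg => if pg.1 == "Has Fat" && pg.2 == "Has Fat" then acc + 1 else acc) 0
  let tn : Int := (predictions.zip ground_truth).foldl (fun acc pg => if pg.1 == "No Fat" && pg.2 == "No Fat" then acc + 1 else acc) 0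
  let fp : Int := (predictions.zip ground_truth).foldl (fun acc pg => if pg.1 == "Has Fat" && pg.2 == "No Fat" then acc + 1 else acc) 0
  let fn : Int := (predictions.zip ground_truth).foldl (fun acc pg => if pg.1 == "No Fat" && pg.2 == "Has Fat" then acc + 1 else acc) 0
  [("true_positive", tp), ("true_negative", tn), ("false_positive", fp), ("false_negative", fn), ("total", (predictions.length : Int))]

-- ===== PORT B =====
-- one loop step: the nested decision tree from Source B, updating the four-counter state
def pvCcmStep (st : Int × Int × Int × Int) (pg : String × String) : Int × Int × Int × Int :=
  let (tp, tn, fp, fn) := st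
  if pg.1 == "Has Fat" then
    if pg.2 == "Has Fat" then (tp + 1, tn, fp, fn)
    else if pg.2 == "No Fat" then (tp, tn, fp + 1, fn)
    else (tp, tn, fp, fn)
  else if pg.1 == "No Fat" then
    if pg.2 == "Has Fat" then (tp, tn, fp, fn + 1)
    else if pg.2 == "No Fat" then (tp, tn + 1, fp, fn)
    else (tp, tn, fp, fn)
  else (tp, tn, fp, fn)

def calculate_confusion_matrix_alt (predictions : List String) (ground_truth : List String) : List (String × Int) :=
  let (tp, tn, fp, fn) := (predictions.zip ground_truth).foldl pvCcmStep (0, 0, 0, 0)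
  [("true_positive", tp), ("true_negative", tn), ("false_positive", fp), ("false_negative", fn), ("total", (predictions.length : Int))]

-- ===== PRECONDITION & SPEC =====
-- Pre_ excludes only the inputs on which A's assert raises (unequal lengths); B asserts identically.
def Pre_calculate_confusion_matrix (predictions : List String) (ground_truth : List String) : Prop :=
  predictions.length = ground_truth.length
instance (predictions : List String) (ground_truth : List String) : Decidable (Pre_calculate_confusion_matrix predictions ground_truth) := by unfold Pre_calculate_confusion_matrix; infer_instance
def pvWitness_calculate_confusion_matrix : List String × List String :=
  (["Has Fat", "No Fat", "Has Fat"], ["Has Fat", "Has Fat", "No Fat"])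
def Spec_calculate_confusion_matrix (predictions : List String) (ground_truth : List String) (out : List (String × Int)) : Prop := out = calculate_confusion_matrix_alt predictions ground_truth
instance (predictions : List String) (ground_truth : List String) (out : List (String × Int)) : Decidable (Spec_calculate_confusion_matrix predictions ground_truth out) := by unfold Spec_calculate_confusion_matrix; infer_instance

-- ===== CLAIM (what is proved, stated in full; the proofs are below) =====
def Claim_equal_calculate_confusion_matrix : Prop := ∀ (predictions : List String) (ground_truth : List String), Dom_calculate_confusion_matrix predictions ground_truth → Pre_calculate_confusion_matrix predictions ground_truth → Spec_calculate_confusion_matrix predictions ground_truth (calculate_confusion_matrix predictions ground_truth)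

-- ===== LEMMAS AND PROOFS =====

-- the fused fold computes the four filtered counts componentwise
theorem pv_fused (l : List (String × String)) :
    ∀ (a b c d : Int),
    l.foldl pvCcmStep (a, b, c, d)
      = (l.foldl (fun acc pg => if pg.1 == "Has Fat" && pg.2 == "Has Fat" then acc + 1 else acc) a,
         l.foldl (fun acc pg => if pg.1 == "No Fat" && pg.2 == "No Fat" then acc + 1 else acc) b,
         l.foldl (fun acc pg => if pg.1 == "Has Fat" && pg.2 == "No Fat" then acc + 1 else acc) c,
         l.foldl (fun acc pg => if pg.1 == "No Fat" && pg.2 == "Has Fat" then acc + 1 else acc) d) := by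
  induction l with
  | nil => intro a b c d; rfl
  | cons x xs ih =>
    intro a b c d
    simp only [List.foldl_cons, pvCcmStep]
    by_cases h1 : x.1 = "Has Fat" <;> by_cases h2 : x.2 = "Has Fat" <;>
      by_cases h3 : x.1 = "No Fat" <;> by_cases h4 : x.2 = "No Fat" <;>
      simp [h1, h2, h3, h4, ih]

-- ===== VERDICT (by name: the statement is the Claim_ definition above) =====
theorem calculate_confusion_matrix_spec : Claim_equal_calculate_confusion_matrix := by
  intro predictions ground_truth _ _
  unfold Spec_calculate_confusion_matrix calculate_confusion_matrix calculate_confusion_matrix_alt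
  rw [pv_fused]
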